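-- pv_equiv track=rewrite | github.com/farhakhans/TODO-UI-APP-003-fullstack-todo-app-003-fullstack-todo-app | backend/src/api/ai_agent.py | estimate_total_completion_time
-- ===== SOURCE A (Python) =====
-- from typing import List, Dict, Any
--
-- def estimate_total_completion_time(tasks: List[Dict]) -> float:
--     """
--     Estimate total time needed to complete all tasks
--     """
--     # Simple estimation based on priority and task count
--     time_estimate = 0
--
--     for task in tasks:
--         # Base time estimate based on priority
--         if task["priority"] == "high":
--             time_estimate += 60  # 60 minutes for high priority
--         elif task["priority"] == "medium":
--             time_estimate += 45  # 45 minutes for medium priority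
--         else:  # low
--             time_estimate += 30  # 30 minutes for low priority
--
--     return time_estimate
-- ===== SOURCE B (Python) =====
-- MINUTES = {"high": 60, "medium": 45}
--
-- def estimate_total_completion_time(tasks):
--     # Histogram the priorities once, then weight each DISTINCT priority
--     # via a lookup table (default 30) -- no per-task branching.
--     counts = {}
--     for task in tasks:
--         p = task["priority"]
--         counts[p] = counts.get(p, 0) + 1
--     return sum(MINUTES.get(p, 30) * n for p, n in counts.items())
-- ===== Notes on version B (the rewrite author's own statement) =====
-- stated objective: alternative
-- what changed: Replaces the per-task if/elif accumulation by building a priority histogram (dict) in one pass and then summing weight*count over the distinct priorities, with the 60/45/30 weights moved from control flow into a lookup table with default 30.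
import Mathlib
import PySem

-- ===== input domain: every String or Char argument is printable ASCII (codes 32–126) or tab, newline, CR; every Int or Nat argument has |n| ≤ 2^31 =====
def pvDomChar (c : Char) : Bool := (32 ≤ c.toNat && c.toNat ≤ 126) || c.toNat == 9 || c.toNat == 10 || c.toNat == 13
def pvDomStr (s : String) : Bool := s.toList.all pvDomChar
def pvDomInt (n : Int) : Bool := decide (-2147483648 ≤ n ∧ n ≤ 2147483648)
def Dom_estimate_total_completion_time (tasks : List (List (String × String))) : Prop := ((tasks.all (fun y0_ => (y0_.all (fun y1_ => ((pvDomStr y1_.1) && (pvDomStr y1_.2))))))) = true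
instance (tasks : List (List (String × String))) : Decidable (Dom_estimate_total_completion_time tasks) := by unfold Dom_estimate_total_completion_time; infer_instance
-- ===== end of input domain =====

-- B replaces A's per-task if/elif accumulation by a priority histogram (dict) plus a weight lookup table summed over distinct priorities; same O(n) cost (objective: alternative).


-- ===== PORT A =====
-- one loop, adding 60/45/30 minutes per task depending on task["priority"]
-- (the 'none' branch is unreachable under Pre_: Python raises KeyError there)
def estimate_total_completion_time (tasks : List (List (String × String))) : Int :=
  tasks.foldl (fun time_estimate task =>
    match (PySem.Dict.ofList task).get? "priority" with
    | some p =>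
        if p == "high" then time_estimate + 60
        else if p == "medium" then time_estimate + 45
        else time_estimate + 30
    | none => time_estimate) 0

-- ===== PORT B =====
-- MINUTES = {"high": 60, "medium": 45}
def pvMinutes : PySem.Dict String Int := PySem.Dict.ofList [("high", 60), ("medium", 45)]

-- build a priority histogram, then sum MINUTES.get(p, 30) * n over its items
-- (the 'none' branch is unreachable under Pre_: Python raises KeyError there)
def estimate_total_completion_time_alt (tasks : List (List (String × String))) : Int :=
  let counts : PySem.Dict String Int :=
    tasks.foldl (fun counts task =>
      match (PySem.Dict.ofList task).get? "priority" with
      | some p => counts.modify p 0 (· + 1)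
      | none => counts) PySem.Dict.empty
  counts.items.foldl (fun s pn => s + pvMinutes.getD pn.1 30 * pn.2) 0

-- ===== PRECONDITION & SPEC =====
-- Pre_ excludes exactly the tasks lacking a "priority" key, on which Python A raises KeyError.
def Pre_estimate_total_completion_time (tasks : List (List (String × String))) : Prop :=
  ∀ t ∈ tasks, ((PySem.Dict.ofList t).get? "priority").isSome = true
instance (tasks : List (List (String × String))) : Decidable (Pre_estimate_total_completion_time tasks) := by unfold Pre_estimate_total_completion_time; infer_instance
def pvWitness_estimate_total_completion_time : (List (List (String × String))) :=
  [[("priority", "high")], [("priority", "low")]]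
def Spec_estimate_total_completion_time (tasks : List (List (String × String))) (out : Int) : Prop := out = estimate_total_completion_time_alt tasks
instance (tasks : List (List (String × String))) (out : Int) : Decidable (Spec_estimate_total_completion_time tasks out) := by unfold Spec_estimate_total_completion_time; infer_instance

-- ===== CLAIM (what is proved, stated in full; the proofs are below) =====
def Claim_equal_estimate_total_completion_time : Prop := ∀ (tasks : List (List (String × String))), Dom_estimate_total_completion_time tasks → Pre_estimate_total_completion_time tasks → Spec_estimate_total_completion_time tasks (estimate_total_completion_time tasks)

-- ===== LEMMAS AND PROOFS =====

-- the priority of a task (defined whenever Pre_ holds)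
def pvKey (t : List (String × String)) : String :=
  ((PySem.Dict.ofList t).get? "priority").getD ""

-- the per-priority weight, as A's branch chain computes it
def pvW (p : String) : Int :=
  if p = "high" then 60 else if p = "medium" then 45 else 30

lemma pvMinutes_eq : pvMinutes = (PySem.Dict.empty.insert "high" 60).insert "medium" 45 := by
  decide

lemma pvMinutes_getD (p : String) : pvMinutes.getD p 30 = pvW p := by
  rw [pvMinutes_eq]
  by_cases h1 : p = "high"
  · subst h1; decide
  · by_cases h2 : p = "medium"
    · subst h2; decide
    · simp [pvW, PySem.Dict.getD_insert, h1, h2]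

-- A's loop is the sum of the weights of the priorities
lemma pvA_eq_sum (tasks : List (List (String × String)))
    (h : ∀ t ∈ tasks, ((PySem.Dict.ofList t).get? "priority").isSome = true) :
    estimate_total_completion_time tasks = ((tasks.map pvKey).map pvW).sum := by
  unfold estimate_total_completion_time
  have hstep : tasks.foldl (fun time_estimate task =>
      match (PySem.Dict.ofList task).get? "priority" with
      | some p =>
          if p == "high" then time_estimate + 60
          else if p == "medium" then time_estimate + 45
          else time_estimate + 30
      | none => time_estimate) (0 : Int)
      = tasks.foldl (fun acc t => acc + (pvW ∘ pvKey) t) 0 := by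
    apply PySem.List.foldl_congr_mem
    intro acc t ht
    obtain ⟨p, hp⟩ := Option.isSome_iff_exists.mp (h t ht)
    simp only [Function.comp, pvKey, hp, Option.getD_some, pvW]
    by_cases h1 : p = "high"
    · simp [h1]
    · by_cases h2 : p = "medium" <;> simp [h1, h2]
  rw [hstep, PySem.List.foldl_add, List.map_map, zero_add]

-- B's histogram is the Counter of the priority list
lemma pvB_counts (tasks : List (List (String × String)))
    (h : ∀ t ∈ tasks, ((PySem.Dict.ofList t).get? "priority").isSome = true) :
    tasks.foldl (fun counts task =>
      match (PySem.Dict.ofList task).get? "priority" with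
      | some p => counts.modify p 0 (· + 1)
      | none => counts) (PySem.Dict.empty : PySem.Dict String Int)
      = PySem.Dict.counter (tasks.map pvKey) := by
  rw [PySem.Dict.counter_eq_foldl, List.foldl_map]
  apply PySem.List.foldl_congr_mem
  intro acc t ht
  obtain ⟨p, hp⟩ := Option.isSome_iff_exists.mp (h t ht)
  simp [hp, pvKey]

-- sum over xs splits off the occurrences of one value
lemma pvSum_split (w : String → Int) (k : String) (xs : List String) :
    (xs.map w).sum = (xs.count k : Int) * w k + ((xs.filter (· ≠ k)).map w).sum := by
  induction xs with
  | nil => simp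
  | cons x xs ih =>
    by_cases hx : x = k
    · subst hx
      simp only [List.map_cons, List.sum_cons, List.count_cons_self, List.filter_cons]
      simp only [ne_eq, not_true_eq_false, decide_false]
      rw [ih]; push_cast; ring
    · simp only [List.map_cons, List.sum_cons, List.count_cons_of_ne hx, List.filter_cons,
        ne_eq, hx, not_false_eq_true, decide_true, if_true]
      rw [ih]; ring

-- summing w k * count k over any nodup list with the same members as xs gives Σ w
lemma pvSum_over_distinct (w : String → Int) :
    ∀ (L : List String) (xs : List String), L.Nodup → (∀ k, k ∈ L ↔ k ∈ xs) →
    (L.map (fun k => w k * (xs.count k : Int))).sum = (xs.map w).sum := by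
  intro L
  induction L with
  | nil =>
    intro xs _ hmem
    have : xs = [] := List.eq_nil_iff_forall_not_mem.mpr (fun a ha => by
      exact absurd ((hmem a).mpr ha) (List.not_mem_nil))
    simp [this]
  | cons k0 L ih =>
    intro xs hnd hmem
    have hnd' := (List.nodup_cons.mp hnd)
    have hcnt : ∀ k ∈ L, xs.count k = (xs.filter (· ≠ k0)).count k := by
      intro k hk
      have hkk0 : k ≠ k0 := fun he => hnd'.1 (he ▸ hk)
      rw [List.count_filter]
      simp [hkk0]
    have hmem' : ∀ k, k ∈ L ↔ k ∈ xs.filter (· ≠ k0) := by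
      intro k
      constructor
      · intro hk
        have hkk0 : k ≠ k0 := fun he => hnd'.1 (he ▸ hk)
        exact List.mem_filter.mpr ⟨(hmem k).mp (List.mem_cons_of_mem _ hk), by simp [hkk0]⟩
      · intro hk
        obtain ⟨hkx, hne⟩ := List.mem_filter.mp hk
        have := (hmem k).mpr hkx
        rcases List.mem_cons.mp this with he | hL
        · exact absurd he (by simpa using hne)
        · exact hL
    have hrec := ih (xs.filter (· ≠ k0)) hnd'.2 hmem'
    have hLcong : (L.map (fun k => w k * (xs.count k : Int))).sum
        = (L.map (fun k => w k * ((xs.filter (· ≠ k0)).count k : Int))).sum := by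
      congr 1
      apply List.map_congr_left
      intro k hk
      rw [hcnt k hk]
    rw [List.map_cons, List.sum_cons, hLcong, hrec, pvSum_split w k0 xs]
    ring

-- ===== VERDICT (by name: the statement is the Claim_ definition above) =====
theorem estimate_total_completion_time_spec : Claim_equal_estimate_total_completion_time := by
  intro tasks _ hpre
  unfold Spec_estimate_total_completion_time
  unfold estimate_total_completion_time_alt
  rw [pvB_counts tasks hpre, pvA_eq_sum tasks hpre]
  show (List.map pvW (List.map pvKey tasks)).sum
    = List.foldl (fun s pn => s + pvMinutes.getD pn.1 30 * pn.2) 0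
        (PySem.Dict.counter (List.map pvKey tasks)).items
  rw [PySem.Dict.items_counter, PySem.List.foldl_add, zero_add, List.map_map, List.map_map]
  have : ((PySem.Set.ofList (tasks.map pvKey)).map
      ((fun pn : String × Int => pvMinutes.getD pn.1 30 * pn.2) ∘
        fun k => (k, ((tasks.map pvKey).count k : Int)))).sum
      = ((PySem.Set.ofList (tasks.map pvKey)).map
        (fun k => pvW k * ((tasks.map pvKey).count k : Int))).sum := by
    congr 1
    apply List.map_congr_left
    intro k _
    simp [Function.comp, pvMinutes_getD]
  rw [this, pvSum_over_distinct pvW (PySem.Set.ofList (tasks.map pvKey)) (tasks.map pvKey)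
    (PySem.Set.nodup_ofList _) (fun k => PySem.Set.mem_ofList _ k), List.map_map]
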